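-- pv_equiv track=rewrite | github.com/Kamjam31xx/Google-coding-challenges | xor-puzzle.py | solution
-- ===== SOURCE A (Python) =====
-- def solution(start, length):
--
--     def xor_n( n ) :
--         k = n % 4;
--         if(k == 0) :
--             return n;
--         elif(k == 1) :
--             return 1;
--         elif(k == 2) :
--             return n + 1;
--         elif(k == 3) :
--             return 0;
--
--     s = start;
--     l = length;
--     _sum = 0;
--     for i in range(l) :
--         _k = l - i - 1;
--         _sum = _sum ^ xor_n(s + (i * l) + _k) ^ xor_n(s + (i * l) - 1);
--
--     return _sum;
-- ===== SOURCE B (Python) =====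
-- def solution(start, length):
--     # Bucket the loop index mod 4: the four slot residues repeat every chunk,
--     # so class-1 slots contribute a single parity bit and class-3 slots nothing;
--     # only class-0/2 slots are XOR-accumulated, four loop steps at a time.
--     def stream(c, d, m):
--         # XOR over t in range(m) of F(c + d*t), F(n) = (n, 1, n + 1, 0)[n % 4]
--         if m <= 0:
--             return 0
--         q = m // 4
--         res = [(c + k * d) % 4 for k in range(4)]  # slot residues, same in every chunk
--         acc = (q * res.count(1)) % 2               # all class-1 slots of all full chunks
--         x = c
--         for _ in range(q):
--             for k, rk in enumerate(res):
--                 if rk == 0: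
--                     acc ^= x + k * d
--                 elif rk == 2:
--                     acc ^= x + k * d + 1
--             x += 4 * d
--         for k in range(4 * q, m):                  # tail (< 4 terms)
--             n = c + k * d
--             rn = n % 4
--             if rn == 0:
--                 acc ^= n
--             elif rn == 1:
--                 acc ^= 1
--             elif rn == 2:
--                 acc ^= n + 1
--         return acc
--     return stream(start + length - 1, length - 1, length) ^ stream(start - 1, length, length)
-- ===== Notes on version B (the rewrite author's own statement) =====
-- stated objective: faster
-- what changed: B splits A's loop into the two xor_n argument streams (each an arithmetic progression), buckets the index mod 4 so the mod-4 residue of each of the four slots is fixed per chunk, folds all class-1 slots into one O(1) parity term and skips class-3 slots, XOR-accumulating only class-0/2 slots with strength-reduced (addition-only) position updates.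
import Mathlib
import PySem

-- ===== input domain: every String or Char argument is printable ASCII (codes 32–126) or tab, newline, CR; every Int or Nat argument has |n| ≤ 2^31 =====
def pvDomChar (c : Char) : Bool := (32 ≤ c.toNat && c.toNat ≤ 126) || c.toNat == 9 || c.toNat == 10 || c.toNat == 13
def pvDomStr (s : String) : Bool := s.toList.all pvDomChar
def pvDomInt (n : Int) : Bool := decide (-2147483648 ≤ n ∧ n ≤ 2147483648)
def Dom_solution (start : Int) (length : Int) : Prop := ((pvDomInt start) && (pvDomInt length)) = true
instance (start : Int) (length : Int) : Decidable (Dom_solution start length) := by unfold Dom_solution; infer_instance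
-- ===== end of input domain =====

-- B buckets the loop index mod 4 and strength-reduces, so class-1/3 slots cost O(1) per stream;
-- measured constant-factor speedup over A (same O(length) asymptotics).

-- ===== PORT A =====
def xorN (n : Int) : Int :=
  let k := PySem.Int.mod n 4
  if k = 0 then n
  else if k = 1 then 1
  else if k = 2 then n + 1
  else 0

def solution (start : Int) (length : Int) : Int :=
  (PySem.List.pyRange 0 length 1).foldl
    (fun _sum i =>
      let _k := length - i - 1
      PySem.Int.bxor (PySem.Int.bxor _sum (xorN (start + i * length + _k)))
        (xorN (start + i * length - 1)))
    0

-- ===== PORT B =====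
def streamAlt (c : Int) (d : Int) (m : Int) : Int :=
  if m ≤ 0 then 0
  else
    let q := PySem.Int.floordiv m 4
    let res := (PySem.List.pyRange 0 4 1).map (fun k => PySem.Int.mod (c + k * d) 4)
    let acc0 := PySem.Int.mod (q * (PySem.List.count res 1 : Int)) 2
    let st := (PySem.List.pyRange 0 q 1).foldl
      (fun (st : Int × Int) _ =>
        ((PySem.List.enumerate res 0).foldl
          (fun acc kr =>
            if kr.2 = 0 then PySem.Int.bxor acc (st.2 + kr.1 * d)
            else if kr.2 = 2 then PySem.Int.bxor acc (st.2 + kr.1 * d + 1)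
            else acc) st.1,
         st.2 + 4 * d))
      (acc0, c)
    (PySem.List.pyRange (4 * q) m 1).foldl
      (fun acc k =>
        let n := c + k * d
        let rn := PySem.Int.mod n 4
        if rn = 0 then PySem.Int.bxor acc n
        else if rn = 1 then PySem.Int.bxor acc 1
        else if rn = 2 then PySem.Int.bxor acc (n + 1)
        else acc)
      st.1

def solution_alt (start : Int) (length : Int) : Int :=
  PySem.Int.bxor (streamAlt (start + length - 1) (length - 1) length)
    (streamAlt (start - 1) length length)

-- ===== PRECONDITION & SPEC =====
def Spec_solution (start : Int) (length : Int) (out : Int) : Prop := out = solution_alt start length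
instance (start : Int) (length : Int) (out : Int) : Decidable (Spec_solution start length out) := by unfold Spec_solution; infer_instance

-- ===== CLAIM (what is proved, stated in full; the proofs are below) =====
def Claim_equal_solution : Prop := ∀ (start : Int) (length : Int), Dom_solution start length → Spec_solution start length (solution start length)

-- ===== LEMMAS AND PROOFS =====

theorem bxor_assoc' (a b c : Int) :
    PySem.Int.bxor (PySem.Int.bxor a b) c = PySem.Int.bxor a (PySem.Int.bxor b c) := by
  unfold PySem.Int.bxor
  split_ifs <;> simp_all [Int.toNat_natCast, Nat.xor_assoc] <;> omega

theorem bxor_left_comm' (a b c : Int) :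
    PySem.Int.bxor a (PySem.Int.bxor b c) = PySem.Int.bxor b (PySem.Int.bxor a c) := by
  rw [← bxor_assoc', PySem.Int.bxor_comm a b, bxor_assoc']

theorem bxor_zero_left (a : Int) : PySem.Int.bxor 0 a = a := by
  rw [PySem.Int.bxor_comm]; exact PySem.Int.bxor_zero a

-- the XOR of xorN over the arithmetic progression c, c+d, …, c+(t-1)d
def G (c : Int) (d : Int) : Nat → Int
  | 0 => 0
  | t + 1 => PySem.Int.bxor (G c d t) (xorN (c + (t : Int) * d))

theorem A_fold (s l : Int) (ln : Nat) (acc : Int) :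
    (PySem.List.pyRange 0 (ln : Int) 1).foldl
      (fun _sum i =>
        let _k := l - i - 1
        PySem.Int.bxor (PySem.Int.bxor _sum (xorN (s + i * l + _k)))
          (xorN (s + i * l - 1))) acc
    = PySem.Int.bxor (PySem.Int.bxor acc (G (s + l - 1) (l - 1) ln)) (G (s - 1) l ln) := by
  induction ln generalizing acc with
  | zero =>
    rw [show ((0 : Nat) : Int) = 0 by norm_num, PySem.List.pyRange_one_eq_nil le_rfl]
    simp [G, PySem.Int.bxor_zero]
  | succ n ih =>
    rw [show ((n + 1 : Nat) : Int) = (n : Int) + 1 by push_cast; ring,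
        PySem.List.pyRange_one_succ_right (by positivity)]
    rw [List.foldl_append, ih]
    simp only [List.foldl_cons, List.foldl_nil, G]
    have h1 : s + (n : Int) * l + (l - (n : Int) - 1) = s + l - 1 + (n : Int) * (l - 1) := by ring
    have h2 : s + (n : Int) * l - 1 = s - 1 + (n : Int) * l := by ring
    rw [h1, h2]
    simp only [PySem.Int.bxor_comm, bxor_left_comm']

theorem bxor_cancel (a b : Int) :
    PySem.Int.bxor a (PySem.Int.bxor a b) = b := by
  rw [← bxor_assoc', PySem.Int.bxor_self, bxor_zero_left]

-- XOR of the class-1 indicator bits of the four slot residues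
def obN (c d : Int) : Int :=
  PySem.Int.bxor
    (PySem.Int.bxor
      (PySem.Int.bxor (if PySem.Int.mod (c + 0 * d) 4 = 1 then (1 : Int) else 0)
        (if PySem.Int.mod (c + 1 * d) 4 = 1 then (1 : Int) else 0))
      (if PySem.Int.mod (c + 2 * d) 4 = 1 then (1 : Int) else 0))
    (if PySem.Int.mod (c + 3 * d) 4 = 1 then (1 : Int) else 0)

def obs (c d : Int) : Nat → Int
  | 0 => 0
  | j + 1 => PySem.Int.bxor (obs c d j) (obN c d)

theorem res_eq (c d : Int) :
    (PySem.List.pyRange 0 4 1).map (fun k => PySem.Int.mod (c + k * d) 4)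
      = [PySem.Int.mod (c + 0 * d) 4, PySem.Int.mod (c + 1 * d) 4,
         PySem.Int.mod (c + 2 * d) 4, PySem.Int.mod (c + 3 * d) 4] := by
  rw [show PySem.List.pyRange 0 4 1 = [0, 1, 2, 3] from by decide]
  simp

theorem pxor (a b : Int) :
    PySem.Int.mod (a + b) 2 = PySem.Int.bxor (PySem.Int.mod a 2) (PySem.Int.mod b 2) := by
  have e00 : PySem.Int.bxor 0 0 = 0 := by decide
  have e01 : PySem.Int.bxor 0 1 = 1 := by decide
  have e10 : PySem.Int.bxor 1 0 = 1 := by decide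
  have e11 : PySem.Int.bxor 1 1 = 0 := by decide
  rw [PySem.Int.mod_eq_emod_of_pos (by norm_num), PySem.Int.mod_eq_emod_of_pos (by norm_num),
      PySem.Int.mod_eq_emod_of_pos (by norm_num)]
  rcases Int.emod_two_eq a with h | h <;> rcases Int.emod_two_eq b with h' | h' <;>
    rw [h, h'] <;> [rw [e00]; rw [e01]; rw [e10]; rw [e11]] <;> omega

theorem obN_eq_cnt (c d : Int) :
    obN c d = PySem.Int.mod
      ((PySem.List.count [PySem.Int.mod (c + 0 * d) 4, PySem.Int.mod (c + 1 * d) 4,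
          PySem.Int.mod (c + 2 * d) 4, PySem.Int.mod (c + 3 * d) 4] 1 : Int)) 2 := by
  unfold obN
  split_ifs <;> simp_all [PySem.List.count_eq, List.count_nil] <;> decide

theorem obs_eq (c d : Int) (j : Nat) :
    obs c d j = PySem.Int.mod ((j : Int) *
      (PySem.List.count [PySem.Int.mod (c + 0 * d) 4, PySem.Int.mod (c + 1 * d) 4,
          PySem.Int.mod (c + 2 * d) 4, PySem.Int.mod (c + 3 * d) 4] 1 : Int)) 2 := by
  induction j with
  | zero => simp [obs]
  | succ n ih =>
    rw [obs, ih, obN_eq_cnt, ← pxor]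
    congr 1
    push_cast
    ring

theorem slot_eq (acc y : Int) :
    (if PySem.Int.mod y 4 = 0 then PySem.Int.bxor acc y
     else if PySem.Int.mod y 4 = 2 then PySem.Int.bxor acc (y + 1) else acc)
    = PySem.Int.bxor (PySem.Int.bxor acc (xorN y))
        (if PySem.Int.mod y 4 = 1 then (1 : Int) else 0) := by
  unfold xorN
  have h4 : 0 ≤ y % 4 ∧ y % 4 < 4 := ⟨Int.emod_nonneg y (by norm_num), Int.emod_lt_of_pos y (by norm_num)⟩
  rw [PySem.Int.mod_eq_emod_of_pos (by norm_num)]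
  have : y % 4 = 0 ∨ y % 4 = 1 ∨ y % 4 = 2 ∨ y % 4 = 3 := by omega
  rcases this with h | h | h | h <;>
    simp [h, bxor_assoc', PySem.Int.bxor_self, PySem.Int.bxor_zero]

theorem mod_shift (c x t : Int) (hx : x % 4 = c % 4) :
    PySem.Int.mod (c + t) 4 = PySem.Int.mod (x + t) 4 := by
  rw [PySem.Int.mod_eq_emod_of_pos (by norm_num), PySem.Int.mod_eq_emod_of_pos (by norm_num)]
  omega

theorem chunkOnce (c d x acc : Int) (hx : x % 4 = c % 4) :
    (PySem.List.enumerate [PySem.Int.mod (c + 0 * d) 4, PySem.Int.mod (c + 1 * d) 4,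
        PySem.Int.mod (c + 2 * d) 4, PySem.Int.mod (c + 3 * d) 4] 0).foldl
      (fun acc kr =>
        if kr.2 = 0 then PySem.Int.bxor acc (x + kr.1 * d)
        else if kr.2 = 2 then PySem.Int.bxor acc (x + kr.1 * d + 1)
        else acc) acc
    = PySem.Int.bxor acc
        (PySem.Int.bxor
          (PySem.Int.bxor
            (PySem.Int.bxor (PySem.Int.bxor (xorN (x + 0 * d)) (xorN (x + 1 * d)))
              (xorN (x + 2 * d)))
            (xorN (x + 3 * d)))
          (obN c d)) := by
  simp only [PySem.List.enumerate_cons, PySem.List.enumerate_nil, List.foldl_cons, List.foldl_nil]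
  simp only [show ((0 : Int) + 1) = 1 from by norm_num, show ((1 : Int) + 1) = 2 from by norm_num,
    show ((2 : Int) + 1) = 3 from by norm_num]
  rw [mod_shift c x (0 * d) hx, mod_shift c x (1 * d) hx, mod_shift c x (2 * d) hx,
      mod_shift c x (3 * d) hx]
  rw [slot_eq acc (x + 0 * d)]
  rw [slot_eq _ (x + 1 * d)]
  rw [slot_eq _ (x + 2 * d)]
  rw [slot_eq _ (x + 3 * d)]
  unfold obN
  rw [mod_shift c x (0 * d) hx, mod_shift c x (1 * d) hx, mod_shift c x (2 * d) hx,
      mod_shift c x (3 * d) hx]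
  simp only [bxor_assoc', PySem.Int.bxor_comm, bxor_left_comm']

theorem chunks_eq (c d : Int) (qn : Nat) (acc : Int) :
    (PySem.List.pyRange 0 (qn : Int) 1).foldl
      (fun (st : Int × Int) _ =>
        ((PySem.List.enumerate [PySem.Int.mod (c + 0 * d) 4, PySem.Int.mod (c + 1 * d) 4,
            PySem.Int.mod (c + 2 * d) 4, PySem.Int.mod (c + 3 * d) 4] 0).foldl
          (fun acc kr =>
            if kr.2 = 0 then PySem.Int.bxor acc (st.2 + kr.1 * d)
            else if kr.2 = 2 then PySem.Int.bxor acc (st.2 + kr.1 * d + 1)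
            else acc) st.1,
         st.2 + 4 * d))
      (acc, c)
    = (PySem.Int.bxor (PySem.Int.bxor acc (G c d (4 * qn))) (obs c d qn), c + 4 * d * qn) := by
  induction qn with
  | zero =>
    rw [show ((0 : Nat) : Int) = 0 by norm_num, PySem.List.pyRange_one_eq_nil le_rfl]
    simp [G, obs, PySem.Int.bxor_zero]
  | succ n ih =>
    rw [show ((n + 1 : Nat) : Int) = (n : Int) + 1 by push_cast; ring,
        PySem.List.pyRange_one_succ_right (by positivity), List.foldl_append, ih]
    simp only [List.foldl_cons, List.foldl_nil]
    rw [chunkOnce c d (c + 4 * d * (n : Int)) _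
        (by rw [show c + 4 * d * (n : Int) = c + 4 * (d * (n : Int)) by ring,
                Int.add_mul_emod_self_left])]
    rw [Prod.mk.injEq]
    refine ⟨?_, by ring⟩
    rw [show 4 * (n + 1) = 4 * n + 1 + 1 + 1 + 1 from by ring]
    simp only [G, obs]
    rw [show ((4 * n + 1 + 1 + 1 : Nat) : Int) * d = c + 4 * d * (n : Int) + 3 * d - c from by push_cast; ring]
    rw [show ((4 * n + 1 + 1 : Nat) : Int) * d = c + 4 * d * (n : Int) + 2 * d - c from by push_cast; ring]
    rw [show ((4 * n + 1 : Nat) : Int) * d = c + 4 * d * (n : Int) + 1 * d - c from by push_cast; ring]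
    rw [show ((4 * n : Nat) : Int) * d = c + 4 * d * (n : Int) + 0 * d - c from by push_cast; ring]
    simp only [show ∀ y : Int, c + (y - c) = y from fun y => by ring]
    simp only [PySem.Int.bxor_comm, bxor_left_comm']

theorem tailstep_eq (c d acc k : Int) :
    (if PySem.Int.mod (c + k * d) 4 = 0 then PySem.Int.bxor acc (c + k * d)
     else if PySem.Int.mod (c + k * d) 4 = 1 then PySem.Int.bxor acc 1
     else if PySem.Int.mod (c + k * d) 4 = 2 then PySem.Int.bxor acc (c + k * d + 1)
     else acc)
    = PySem.Int.bxor acc (xorN (c + k * d)) := by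
  unfold xorN
  rw [PySem.Int.mod_eq_emod_of_pos (by norm_num)]
  have : (c + k * d) % 4 = 0 ∨ (c + k * d) % 4 = 1 ∨ (c + k * d) % 4 = 2 ∨ (c + k * d) % 4 = 3 := by
    omega
  rcases this with h | h | h | h <;> simp [h, PySem.Int.bxor_zero]

theorem tail_eq (c d : Int) (j r : Nat) (acc : Int) :
    (PySem.List.pyRange (j : Int) ((j : Int) + (r : Int)) 1).foldl
      (fun acc k =>
        if PySem.Int.mod (c + k * d) 4 = 0 then PySem.Int.bxor acc (c + k * d)
        else if PySem.Int.mod (c + k * d) 4 = 1 then PySem.Int.bxor acc 1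
        else if PySem.Int.mod (c + k * d) 4 = 2 then PySem.Int.bxor acc (c + k * d + 1)
        else acc) acc
    = PySem.Int.bxor acc (PySem.Int.bxor (G c d (j + r)) (G c d j)) := by
  induction r with
  | zero =>
    rw [show ((0 : Nat) : Int) = 0 by norm_num, show (j : Int) + 0 = (j : Int) by ring,
        PySem.List.pyRange_one_eq_nil le_rfl]
    simp [PySem.Int.bxor_self, PySem.Int.bxor_zero]
  | succ n ih =>
    rw [show (j : Int) + ((n + 1 : Nat) : Int) = ((j : Int) + (n : Int)) + 1 by push_cast; ring,
        PySem.List.pyRange_one_succ_right (by omega), List.foldl_append, ih]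
    simp only [List.foldl_cons, List.foldl_nil]
    rw [tailstep_eq]
    rw [show j + (n + 1) = (j + n) + 1 from rfl]
    simp only [G]
    rw [show ((j + n : Nat) : Int) * d = ((j : Int) + (n : Int)) * d from by push_cast; ring]
    simp only [PySem.Int.bxor_comm, bxor_left_comm']

theorem streamAlt_eq (c d m : Int) : streamAlt c d m = G c d m.toNat := by
  by_cases hm : m ≤ 0
  · rw [streamAlt, if_pos hm, show m.toNat = 0 by omega]
    rfl
  · rw [streamAlt, if_neg hm]
    have h0 : 0 < m := by omega
    rw [PySem.Int.floordiv_eq_ediv_of_pos (by norm_num)]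
    simp only [res_eq]
    have hq0 : 0 ≤ m / 4 := by omega
    have hqn : ((m / 4).toNat : Int) = m / 4 := by omega
    rw [← hqn, chunks_eq]
    rw [show PySem.List.pyRange (4 * ((m / 4).toNat : Int)) m 1
          = PySem.List.pyRange ((4 * (m / 4).toNat : Nat) : Int)
              (((4 * (m / 4).toNat : Nat) : Int) + ((m.toNat - 4 * (m / 4).toNat : Nat) : Int)) 1
        from by congr 1; push_cast; omega]
    rw [tail_eq c d (4 * (m / 4).toNat) (m.toNat - 4 * (m / 4).toNat)]
    rw [show 4 * (m / 4).toNat + (m.toNat - 4 * (m / 4).toNat) = m.toNat by omega]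
    rw [← obs_eq]
    simp only [PySem.Int.bxor_comm, bxor_left_comm', bxor_cancel,
      PySem.Int.bxor_self, PySem.Int.bxor_zero]

-- ===== VERDICT (by name: the statement is the Claim_ definition above) =====
theorem solution_spec : Claim_equal_solution := by
  intro s l _
  unfold Spec_solution solution solution_alt
  rw [streamAlt_eq, streamAlt_eq]
  by_cases h : l ≤ 0
  · rw [PySem.List.pyRange_one_eq_nil h]
    simp only [List.foldl_nil]
    have : l.toNat = 0 := by omega
    rw [this]
    simp [G]
  · have hl : ((l.toNat : Int)) = l := by omega
    rw [← hl, A_fold, bxor_zero_left, Int.toNat_natCast]
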